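-- pv_equiv track=rewrite | github.com/rawi124/fonctionsUtilesCrypto | tp6.py | gencirculante
-- ===== SOURCE A (Python) =====
-- import copy
--
-- def gencirculante(L) :
--     i = 1
--     t = copy.copy(L)
--     s=[]
--     s = s + [L]
--     x=len(L)-1
--     z = x
--     while i < len(L) :
--         t=[t[x]]+t[:x]
--         i = i + 1
--         t = copy.copy(t)
--         s=s+[t]
--     return s
-- ===== SOURCE B (Python) =====
-- def gencirculante(L):
--     n = len(L)
--     return [[L[(j - i) % n] for j in range(n)] for i in range(n)]
-- ===== Notes on version B (the rewrite author's own statement) =====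
-- stated objective: simpler
-- what changed: Replaces the incremental right-rotation loop with accumulated state by computing each row independently from the original list via modular indexing L[(j-i)%n].
-- intended difference: On the empty list A returns [[]] (one empty row, a leftover of its unconditional first append), while B returns [], the 0x0 circulant matrix, which is the intended value. — e.g. on gencirculante([]): A returns [[]], B returns []
import Mathlib
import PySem

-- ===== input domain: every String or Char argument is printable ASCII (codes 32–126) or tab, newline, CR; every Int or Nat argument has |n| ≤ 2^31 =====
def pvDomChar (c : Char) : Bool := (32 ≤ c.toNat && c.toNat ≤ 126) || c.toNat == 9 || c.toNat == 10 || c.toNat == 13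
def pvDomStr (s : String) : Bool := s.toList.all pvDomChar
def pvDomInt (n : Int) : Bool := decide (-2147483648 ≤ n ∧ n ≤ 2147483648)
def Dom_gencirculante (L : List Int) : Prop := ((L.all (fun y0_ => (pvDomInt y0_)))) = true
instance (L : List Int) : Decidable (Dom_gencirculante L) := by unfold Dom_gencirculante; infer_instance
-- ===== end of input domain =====

-- B replaces A's incremental right-rotation loop by independent modular indexing of each row;
-- objective: simpler. On the empty list A returns [[]] while B returns [] (see D_ below).

-- ===== PORT A =====
-- one loop body: t = [t[x]] + t[:x]  (pyGet? is none exactly where Python raises IndexError;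
-- inside A's loop x = len(t)-1 is always in range, so the none branch is unreachable)
def rotA (x : Int) (t : List Int) : List Int :=
  match PySem.List.pyGet? t x with
  | some v => v :: PySem.List.slice t none (some x)
  | none => []

-- the while loop: k = remaining iterations (i counts 1 .. len(L)-1), t the rotating list, s the accumulator
def loopA : Nat → Int → List Int → List (List Int) → List (List Int)
  | 0, _, _, s => s
  | k + 1, x, t, s =>
      let t' := rotA x t
      loopA k x t' (s ++ [t'])

def gencirculante (L : List Int) : List (List Int) :=
  let t := L
  let s : List (List Int) := [] ++ [L]
  let x : Int := (L.length : Int) - 1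
  loopA (L.length - 1) x t s

-- ===== PORT B =====
-- inner comprehension of Source B: [L[(j - i) % n] for j in range(n)]  (index (j-i) % n is always in
-- range for n = len L > 0, so the pyGetD default 0 is never used)
def rowB (L : List Int) (i : Nat) : List Int :=
  (List.range L.length).map
    (fun (j : Nat) =>
      PySem.List.pyGetD L (PySem.Int.mod ((j : Int) - (i : Int)) (L.length : Int)) 0)

def gencirculante_alt (L : List Int) : List (List Int) :=
  (List.range L.length).map (fun i => rowB L i)

-- ===== PRECONDITION & SPEC =====
-- On the empty list A returns [[]] (a leftover of its unconditional first append s = s + [L]),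
-- while B returns [], the 0x0 circulant matrix, which is the intended value.
def D_gencirculante (L : List Int) : Prop := L = []
instance (L : List Int) : Decidable (D_gencirculante L) := by unfold D_gencirculante; infer_instance

def Spec_gencirculante (L : List Int) (out : List (List Int)) : Prop :=
  ¬ D_gencirculante L → out = gencirculante_alt L
instance (L : List Int) (out : List (List Int)) : Decidable (Spec_gencirculante L out) := by unfold Spec_gencirculante; infer_instance

def pvDiffWitness_gencirculante : List Int := []
def pvDiffWitnessOut_gencirculante : (List (List Int)) × (List (List Int)) := ([[]], [])

-- ===== CLAIM (what is proved, stated in full; the proofs are below) =====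
def Claim_unchanged_gencirculante : Prop := ∀ (L : List Int), Dom_gencirculante L → Spec_gencirculante L (gencirculante L)
def Claim_changed_gencirculante : Prop := Dom_gencirculante (pvDiffWitness_gencirculante) ∧ D_gencirculante (pvDiffWitness_gencirculante) ∧ gencirculante (pvDiffWitness_gencirculante) = pvDiffWitnessOut_gencirculante.1 ∧ gencirculante_alt (pvDiffWitness_gencirculante) = pvDiffWitnessOut_gencirculante.2 ∧ pvDiffWitnessOut_gencirculante.1 ≠ pvDiffWitnessOut_gencirculante.2
def Claim_exact_gencirculante : Prop := ∀ (L : List Int), Dom_gencirculante L → D_gencirculante L → gencirculante L ≠ gencirculante_alt L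

-- ===== LEMMAS AND PROOFS =====

theorem length_rowB (L : List Int) (i : Nat) : (rowB L i).length = L.length := by
  simp [rowB]

theorem getElem_rowB (L : List Int) (i j : Nat) (hj : j < L.length) :
    (rowB L i)[j]'(by simp [length_rowB, hj]) =
      PySem.List.pyGetD L (PySem.Int.mod ((j : Int) - (i : Int)) (L.length : Int)) 0 := by
  unfold rowB
  rw [List.getElem_map, List.getElem_range]

-- pyGetD at an in-range modular index is plain getElem
theorem pyGetD_mod (L : List Int) (a : Int) (hn : 0 < L.length) :
    PySem.List.pyGetD L (PySem.Int.mod a (L.length : Int)) 0 =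
      L[(PySem.Int.mod a (L.length : Int)).toNat]'(by
        have h1 := PySem.Int.mod_lt a (b := (L.length : Int)) (by exact_mod_cast hn)
        have h2 := PySem.Int.mod_nonneg a (b := (L.length : Int)) (by exact_mod_cast hn)
        omega) := by
  apply PySem.List.pyGetD_eq_getElem
  · exact PySem.Int.mod_nonneg a (by exact_mod_cast hn)
  · exact_mod_cast PySem.Int.mod_lt a (by exact_mod_cast hn)

theorem rowB_zero (L : List Int) (hn : 0 < L.length) : rowB L 0 = L := by
  apply List.ext_getElem
  · simp [length_rowB]
  · intro j hj hj'
    rw [getElem_rowB L 0 j hj']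
    rw [pyGetD_mod L _ hn]
    congr 1
    have hlt : ((j : Int) - (0 : Nat)) < (L.length : Int) := by push_cast; omega
    have h0 : (0 : Int) ≤ (j : Int) - (0 : Nat) := by push_cast; omega
    rw [PySem.Int.mod_eq_emod_of_pos (by exact_mod_cast hn),
        Int.emod_eq_of_lt h0 hlt]
    push_cast; omega

theorem rotA_rowB (L : List Int) (i : Nat) (hn : 0 < L.length) :
    rotA ((L.length : Int) - 1) (rowB L i) = rowB L (i + 1) := by
  have hlen : (rowB L i).length = L.length := length_rowB L i
  have hcast : ((L.length : Int) - 1) = ((L.length - 1 : Nat) : Int) := by omega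
  have hget : PySem.List.pyGet? (rowB L i) ((L.length : Int) - 1) =
      some ((rowB L i)[L.length - 1]'(by omega)) := by
    rw [hcast]
    simp [pysem]
  have hslice : PySem.List.slice (rowB L i) none (some ((L.length : Int) - 1)) =
      (rowB L i).take (L.length - 1) := by
    rw [hcast, PySem.List.slice_to_natCast]
  rw [rotA, hget, hslice]
  apply List.ext_getElem
  · simp [length_rowB, hlen]; omega
  · intro j hj hj'
    have hjn : j < L.length := by simpa [length_rowB] using hj'
    rw [getElem_rowB L (i + 1) j hjn, pyGetD_mod _ _ hn]
    rcases j with _ | j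
    · simp only [List.getElem_cons_zero]
      rw [getElem_rowB L i (L.length - 1) (by omega), pyGetD_mod _ _ hn]
      congr 1
      have e : ((0 : Nat) : Int) - ((i + 1 : Nat) : Int) =
          (((L.length - 1 : Nat) : Int) - (i : Int)) + (L.length : Int) * (-1) := by
        push_cast; omega
      rw [PySem.Int.mod_eq_emod_of_pos (by exact_mod_cast hn),
          PySem.Int.mod_eq_emod_of_pos (by exact_mod_cast hn),
          e, Int.add_mul_emod_self_left]
    · simp only [List.getElem_cons_succ]
      rw [List.getElem_take]
      rw [getElem_rowB L i j (by omega), pyGetD_mod _ _ hn]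
      congr 1
      · congr 1
        congr 1
        push_cast; ring

theorem loopA_rowB (L : List Int) (hn : 0 < L.length) :
    ∀ (k i : Nat),
      loopA k ((L.length : Int) - 1) (rowB L i) ((List.range (i + 1)).map (rowB L)) =
        (List.range (i + 1 + k)).map (rowB L) := by
  intro k
  induction k with
  | zero => intro i; simp [loopA]
  | succ k ih =>
      intro i
      rw [loopA]
      simp only [rotA_rowB L i hn]
      have hs : (List.range (i + 1)).map (rowB L) ++ [rowB L (i + 1)] =
          (List.range (i + 1 + 1)).map (rowB L) := by
        rw [List.range_succ (n := i + 1)]; simp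
      rw [hs, ih (i + 1), show i + 1 + 1 + k = i + 1 + (k + 1) by omega]

-- ===== VERDICT (by name: the statements are the Claim_ definitions above) =====
theorem gencirculante_spec : Claim_unchanged_gencirculante := by
  intro L _ hD
  show gencirculante L = gencirculante_alt L
  have hn : 0 < L.length := by
    cases L with
    | nil => exact absurd rfl hD
    | cons a t => simp
  show loopA (L.length - 1) ((L.length : Int) - 1) L ([] ++ [L]) =
    (List.range L.length).map (fun i => rowB L i)
  have h := loopA_rowB L hn (L.length - 1) 0
  rw [show 0 + 1 + (L.length - 1) = L.length by omega] at h
  simp only [show (0:Nat) + 1 = 1 from rfl, List.range_one, List.map_cons,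
    List.map_nil, rowB_zero L hn] at h
  simpa using h

theorem gencirculante_changed : Claim_changed_gencirculante := by
  unfold Claim_changed_gencirculante; decide

theorem gencirculante_tight : Claim_exact_gencirculante := by
  intro L _ hD
  subst hD
  decide
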